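-- pv_equiv track=rewrite | github.com/vivek625/leetcode_solution | Replacing all digits with character.py | replaceDigits
-- ===== SOURCE A (Python) =====
-- def replaceDigits(s: str) -> str:
--     st = ''
--     t = 0
--     for i in range(0,len(s),2):
--         st+=s[i]
--         t = ord(s[i])
--         if i != len(s)-1:
--             st += chr(t+int(s[i+1]))
--     return (st)
-- ===== SOURCE B (Python) =====
-- def replaceDigits(s: str) -> str:
--     res = list(s)
--     for i in range(1, len(s), 2):
--         res[i] = chr(ord(s[i - 1]) + int(s[i]))
--     return ''.join(res)
-- ===== Notes on version B (the rewrite author's own statement) =====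
-- stated objective: idiomatic
-- what changed: B preallocates res = list(s) and mutates only the odd (digit) positions via range(1, len(s), 2), instead of A's step-2 walk over even positions that conditionally appends a shifted char to a growing string.
import Mathlib
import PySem

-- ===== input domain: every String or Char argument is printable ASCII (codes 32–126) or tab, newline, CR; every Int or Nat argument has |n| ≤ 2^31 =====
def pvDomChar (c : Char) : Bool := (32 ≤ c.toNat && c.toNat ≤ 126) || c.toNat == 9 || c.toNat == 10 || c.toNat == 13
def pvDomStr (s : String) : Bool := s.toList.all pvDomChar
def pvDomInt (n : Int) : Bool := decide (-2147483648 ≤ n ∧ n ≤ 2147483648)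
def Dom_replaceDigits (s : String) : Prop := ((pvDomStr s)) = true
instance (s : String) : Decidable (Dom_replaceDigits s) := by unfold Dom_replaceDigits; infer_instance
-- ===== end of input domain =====

-- ===== PORT A =====
-- B changes the traversal: a preallocated character list mutated at the odd positions only (idiomatic); return values proved equal.
-- chr(ord(a) + int(b)) for a single digit char b; shared helper, both Pythons compute exactly this expression
def pvCh (a b : Char) : Char := Char.ofNat (((a.toNat : Int) + ((b.toNat : Int) - 48)).toNat)

-- the 'for i in range(0, len(s), 2)' loop of A, with its accumulator st and variable t
def replaceDigitsA_loop (l : List Char) (i : Nat) (st : List Char) (_t : Int) : List Char :=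
  if _h : i < l.length then
    let c := l.getD i ' '
    let st1 := st ++ [c]                  -- st += s[i]
    let t1 : Int := c.toNat               -- t = ord(s[i])
    let st2 := if i ≠ l.length - 1 then st1 ++ [pvCh c (l.getD (i + 1) ' ')] else st1
    replaceDigitsA_loop l (i + 2) st2 t1
  else st
termination_by l.length - i

def replaceDigits (s : String) : String :=
  String.mk (replaceDigitsA_loop s.toList 0 [] 0)

-- ===== PORT B =====
-- the 'for i in range(1, len(s), 2)' loop of B, mutating res in place
def replaceDigitsB_loop (l : List Char) (i : Nat) (res : List Char) : List Char :=
  if _h : i < l.length then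
    replaceDigitsB_loop l (i + 2) (res.set i (pvCh (l.getD (i - 1) ' ') (l.getD i ' ')))
  else res
termination_by l.length - i

def replaceDigits_alt (s : String) : String :=
  String.mk (replaceDigitsB_loop s.toList 1 s.toList)

-- ===== PRECONDITION & SPEC =====
-- Pre_ excludes exactly the inputs where Python raises: int(s[i]) at an odd index i needs a digit there.
def Pre_replaceDigits (s : String) : Prop :=
  ∀ i ∈ List.range s.toList.length, i % 2 = 1 → (s.toList.getD i ' ').isDigit = true
instance (s : String) : Decidable (Pre_replaceDigits s) := by unfold Pre_replaceDigits; infer_instance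
def pvWitness_replaceDigits : String := "a1b2"

def Spec_replaceDigits (s : String) (out : String) : Prop := out = replaceDigits_alt s
instance (s : String) (out : String) : Decidable (Spec_replaceDigits s out) := by unfold Spec_replaceDigits; infer_instance

-- ===== CLAIM (what is proved, stated in full; the proofs are below) =====
def Claim_equal_replaceDigits : Prop := ∀ (s : String), Dom_replaceDigits s → Pre_replaceDigits s → Spec_replaceDigits s (replaceDigits s)

-- ===== LEMMAS AND PROOFS =====
-- closed-form result both loops are shown to produce
def pvSpec : List Char → List Char
  | [] => []
  | [a] => [a]
  | a :: b :: r => a :: pvCh a b :: pvSpec r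

theorem pvSpec_length (l : List Char) : (pvSpec l).length = l.length := by
  fun_induction pvSpec l <;> simp [*]

theorem pvSpec_getD (l : List Char) (j : Nat) (hj : j < l.length) :
    (pvSpec l).getD j ' ' =
      if j % 2 = 1 then pvCh (l.getD (j - 1) ' ') (l.getD j ' ') else l.getD j ' ' := by
  fun_induction pvSpec l generalizing j with
  | case1 => simp at hj
  | case2 a =>
    have h0 : j = 0 := by simp at hj; omega
    subst h0
    simp
  | case3 a b r ih =>
    match j with
    | 0 => simp
    | 1 => simp
    | (k + 2) =>
      have hk : k < r.length := by simpa using hj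
      have := ih k hk
      simp only [List.getD_cons_succ]
      have hmod : (k + 2) % 2 = k % 2 := by omega
      rw [hmod, this]
      rcases Nat.eq_or_lt_of_le (Nat.zero_le k) with h0 | hpos
      · simp [← h0]
      · have : k + 2 - 1 = (k - 1) + 2 := by omega
        rw [this]
        simp

theorem loopA_eq (l : List Char) (i : Nat) (st : List Char) (t : Int) :
    replaceDigitsA_loop l i st t = st ++ pvSpec (l.drop i) := by
  rw [replaceDigitsA_loop]
  split
  · next h =>
    rw [loopA_eq]
    have hdrop : l.drop i = l[i] :: l.drop (i + 1) := List.drop_eq_getElem_cons h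
    have hgd : l.getD i ' ' = l[i] := List.getD_eq_getElem l ' ' h
    by_cases hlast : i = l.length - 1
    · have h1 : l.drop (i + 1) = [] := by
        apply List.drop_eq_nil_of_le; omega
      have h2 : l.drop (i + 2) = [] := by
        apply List.drop_eq_nil_of_le; omega
      rw [if_neg (fun hc => hc hlast), hdrop, h1, h2]
      simp [pvSpec, List.getElem?_eq_getElem h]
    · have hi1 : i + 1 < l.length := by omega
      have hdrop1 : l.drop (i + 1) = l[i + 1] :: l.drop (i + 2) := List.drop_eq_getElem_cons hi1
      have hgd1 : l.getD (i + 1) ' ' = l[i + 1] := List.getD_eq_getElem l ' ' hi1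
      rw [if_pos hlast, hdrop, hdrop1]
      simp [pvSpec, List.getElem?_eq_getElem h, List.getElem?_eq_getElem hi1]
  · next h =>
    have : l.drop i = [] := List.drop_eq_nil_of_le (by omega)
    simp [this, pvSpec]
termination_by l.length - i

theorem loopB_length (l : List Char) (i : Nat) (res : List Char) :
    (replaceDigitsB_loop l i res).length = res.length := by
  rw [replaceDigitsB_loop]
  split
  · rw [loopB_length]; simp
  · rfl
termination_by l.length - i

theorem loopB_getD (l : List Char) (i : Nat) (res : List Char) (hlen : res.length = l.length)
    (j : Nat) :
    (replaceDigitsB_loop l i res).getD j ' ' =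
      if i ≤ j ∧ j < l.length ∧ (j - i) % 2 = 0 then
        pvCh (l.getD (j - 1) ' ') (l.getD j ' ')
      else res.getD j ' ' := by
  rw [replaceDigitsB_loop]
  split
  · next h =>
    rw [loopB_getD l (i + 2) _ (by simp [hlen]) j]
    by_cases hji : j = i
    · subst hji
      have : ¬ (j + 2 ≤ j ∧ j < l.length ∧ (j - (j + 2)) % 2 = 0) := by omega
      simp [List.getD, hlen, h]
    · have hset : (res.set i (pvCh (l.getD (i - 1) ' ') (l.getD i ' '))).getD j ' ' = res.getD j ' ' := by
        simp [List.getD, Ne.symm hji]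
      rw [hset]
      have hiff : (i + 2 ≤ j ∧ j < l.length ∧ (j - (i + 2)) % 2 = 0) ↔
          (i ≤ j ∧ j < l.length ∧ (j - i) % 2 = 0) := by omega
      rw [if_congr hiff rfl rfl]
  · next h =>
    have : ¬ (i ≤ j ∧ j < l.length ∧ (j - i) % 2 = 0) := by omega
    simp [this]
termination_by l.length - i

theorem pvSpec_eq_loopB (l : List Char) : pvSpec l = replaceDigitsB_loop l 1 l := by
  apply List.ext_getElem
  · rw [pvSpec_length, loopB_length]
  · intro j h1 h2
    have hj : j < l.length := by rwa [pvSpec_length] at h1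
    have e1 : (pvSpec l)[j] = (pvSpec l).getD j ' ' := (List.getD_eq_getElem _ ' ' h1).symm
    have e2 : (replaceDigitsB_loop l 1 l)[j] = (replaceDigitsB_loop l 1 l).getD j ' ' :=
      (List.getD_eq_getElem _ ' ' h2).symm
    rw [e1, e2, pvSpec_getD l j hj, loopB_getD l 1 l rfl j]
    have hiff : (1 ≤ j ∧ j < l.length ∧ (j - 1) % 2 = 0) ↔ j % 2 = 1 := by omega
    rw [if_congr hiff rfl rfl]

-- ===== VERDICT (by name: the statement is the Claim_ definition above) =====
theorem replaceDigits_spec : Claim_equal_replaceDigits := by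
  intro s _ _
  unfold Spec_replaceDigits replaceDigits replaceDigits_alt
  rw [loopA_eq, ← pvSpec_eq_loopB]
  simp
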